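-- pv_equiv track=rewrite | github.com/Dlfmiee/CP125-Class-Repo | labs/lab06/exercise3/exercise3.py | audit_blocklists
-- ===== SOURCE A (Python) =====
-- def audit_blocklists(list_a, list_b, list_c):
--
--     universal = set()
--
--     for item in list_a:
--         if item in list_b and item in list_c:
--             universal.add(item)
--
--     redundant = set()
--
--     for item in list_a:
--         if item in list_b or item in list_c:
--             redundant.add(item)
--
--     for item in list_b:
--         if item in list_c:
--             redundant.add(item)
--
--     unique_a = set()
--
--     for item in list_a:
--         if item not in list_b and item not in list_c:
--             unique_a.add(item)
--
--     return universal, redundant, unique_a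
-- ===== SOURCE B (Python) =====
-- def audit_blocklists(list_a, list_b, list_c):
--     # One linear indexing pass: a dict mapping each item to (in_a, in_b, in_c)
--     # flags, then a single classification pass over the dict -- no membership
--     # tests against the lists at all.
--     flags = {}
--     for item in list_a:
--         f = flags.get(item, (False, False, False))
--         flags[item] = (True, f[1], f[2])
--     for item in list_b:
--         f = flags.get(item, (False, False, False))
--         flags[item] = (f[0], True, f[2])
--     for item in list_c:
--         f = flags.get(item, (False, False, False))
--         flags[item] = (f[0], f[1], True)
--     universal, redundant, unique_a = set(), set(), set()
--     for item, (fa, fb, fc) in flags.items():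
--         if fa and fb and fc:
--             universal.add(item)
--         if (fa and (fb or fc)) or (fb and fc):
--             redundant.add(item)
--         if fa and not fb and not fc:
--             unique_a.add(item)
--     return universal, redundant, unique_a
-- ===== Notes on version B (the rewrite author's own statement) =====
-- stated objective: faster
-- what changed: Replaces A's repeated list-membership tests inside four loops by one linear indexing pass that builds a dict mapping each item to an (in_a, in_b, in_c) flag triple, followed by a single classification pass over the dict; no membership test against a list remains.
import Mathlib
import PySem

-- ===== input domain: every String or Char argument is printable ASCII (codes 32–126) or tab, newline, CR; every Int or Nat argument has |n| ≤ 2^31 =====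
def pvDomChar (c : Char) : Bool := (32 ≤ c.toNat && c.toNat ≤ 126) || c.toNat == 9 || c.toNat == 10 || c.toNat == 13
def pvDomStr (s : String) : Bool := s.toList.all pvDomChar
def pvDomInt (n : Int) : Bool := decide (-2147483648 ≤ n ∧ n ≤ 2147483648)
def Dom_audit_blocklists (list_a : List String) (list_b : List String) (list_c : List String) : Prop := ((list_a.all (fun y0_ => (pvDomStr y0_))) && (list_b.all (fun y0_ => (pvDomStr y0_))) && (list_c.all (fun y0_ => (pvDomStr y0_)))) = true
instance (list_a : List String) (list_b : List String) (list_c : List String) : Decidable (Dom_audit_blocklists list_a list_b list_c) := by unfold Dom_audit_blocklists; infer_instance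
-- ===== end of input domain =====

-- B replaces A's repeated list-membership loops by a single linear indexing pass:
-- a dict item ↦ (in_a, in_b, in_c) flags, then one classification pass over the dict (faster, linear vs quadratic).

-- ===== PORT A =====
def audit_blocklists (list_a : List String) (list_b : List String) (list_c : List String) : List String × List String × List String :=
  let universal : PySem.Set String :=
    list_a.foldl (fun u item =>
      if list_b.contains item && list_c.contains item then PySem.Set.add u item else u)
      PySem.Set.empty
  let redundant : PySem.Set String :=
    list_a.foldl (fun r item =>
      if list_b.contains item || list_c.contains item then PySem.Set.add r item else r)
      PySem.Set.empty
  let redundant : PySem.Set String :=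
    list_b.foldl (fun r item =>
      if list_c.contains item then PySem.Set.add r item else r)
      redundant
  let unique_a : PySem.Set String :=
    list_a.foldl (fun u item =>
      if !list_b.contains item && !list_c.contains item then PySem.Set.add u item else u)
      PySem.Set.empty
  (universal, redundant, unique_a)

-- ===== PORT B =====
def audit_blocklists_alt (list_a : List String) (list_b : List String) (list_c : List String) : List String × List String × List String :=
  let flags : PySem.Dict String (Bool × Bool × Bool) := PySem.Dict.empty
  let flags := list_a.foldl (fun d item =>
    d.insert item (true, (d.getD item (false, false, false)).2.1, (d.getD item (false, false, false)).2.2)) flags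
  let flags := list_b.foldl (fun d item =>
    d.insert item ((d.getD item (false, false, false)).1, true, (d.getD item (false, false, false)).2.2)) flags
  let flags := list_c.foldl (fun d item =>
    d.insert item ((d.getD item (false, false, false)).1, (d.getD item (false, false, false)).2.1, true)) flags
  flags.items.foldl (fun (acc : PySem.Set String × PySem.Set String × PySem.Set String) p =>
      (if p.2.1 && p.2.2.1 && p.2.2.2 then PySem.Set.add acc.1 p.1 else acc.1,
       if (p.2.1 && (p.2.2.1 || p.2.2.2)) || (p.2.2.1 && p.2.2.2) then PySem.Set.add acc.2.1 p.1 else acc.2.1,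
       if p.2.1 && !p.2.2.1 && !p.2.2.2 then PySem.Set.add acc.2.2 p.1 else acc.2.2))
    (PySem.Set.empty, PySem.Set.empty, PySem.Set.empty)

-- ===== PRECONDITION & SPEC =====
def Spec_audit_blocklists (list_a : List String) (list_b : List String) (list_c : List String) (out : List String × List String × List String) : Prop := out = audit_blocklists_alt list_a list_b list_c
instance (list_a : List String) (list_b : List String) (list_c : List String) (out : List String × List String × List String) : Decidable (Spec_audit_blocklists list_a list_b list_c out) := by unfold Spec_audit_blocklists; infer_instance

-- ===== CLAIM (what is proved, stated in full; the proofs are below) =====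
def Claim_equal_audit_blocklists : Prop := ∀ (list_a : List String) (list_b : List String) (list_c : List String), Dom_audit_blocklists list_a list_b list_c → Spec_audit_blocklists list_a list_b list_c (audit_blocklists list_a list_b list_c)

-- ===== LEMMAS AND PROOFS =====

-- set(xs) commutes with an element-wise filter.
theorem ofList_filter {α : Type} [BEq α] [LawfulBEq α] (p : α → Bool) (xs : List α) :
    PySem.Set.ofList (xs.filter p) = (PySem.Set.ofList xs).filter p := by
  induction xs with
  | nil => rfl
  | cons x xs ih =>
    by_cases hp : p x = true
    · simp [PySem.Set.ofList_cons, hp, ih, PySem.Set.discard, List.filter_filter, Bool.and_comm]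
    · simp only [List.filter_cons, hp, Bool.false_eq_true, if_false,
        PySem.Set.ofList_cons, ih, PySem.Set.discard, List.filter_filter]
      refine (List.filter_congr fun y _ => ?_).symm
      rcases hpy : p y with _ | _
      · simp
      · have hyx : (y == x) = false := by
          rcases h : y == x with _ | _
          · rfl
          · exact absurd (eq_of_beq h ▸ hpy) (by simpa using hp)
        simp [hyx]

-- a 'for' loop doing s.add(x) over l is s.update(l).
theorem foldl_add_eq_update {α : Type} [BEq α] (s : PySem.Set α) (l : List α) :
    l.foldl PySem.Set.add s = PySem.Set.update s l := rfl

-- getD after the pass that sets the first flag.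
theorem getD_passA (l : List String) (d : PySem.Dict String (Bool × Bool × Bool)) (x : String) :
    (l.foldl (fun d item =>
      d.insert item (true, (d.getD item (false, false, false)).2.1, (d.getD item (false, false, false)).2.2)) d).getD x (false, false, false)
      = if x ∈ l then (true, (d.getD x (false, false, false)).2.1, (d.getD x (false, false, false)).2.2)
        else d.getD x (false, false, false) := by
  induction l generalizing d with
  | nil => simp
  | cons y l ih =>
    by_cases hxy : x = y
    · subst hxy
      by_cases hxl : x ∈ l <;>
        simp [List.foldl_cons, ih, hxl, PySem.Dict.getD_insert_self]
    · by_cases hxl : x ∈ l <;>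
        simp [List.foldl_cons, ih, hxl, hxy, PySem.Dict.getD_insert_of_ne _ _ _ hxy]

-- getD after the pass that sets the second flag.
theorem getD_passB (l : List String) (d : PySem.Dict String (Bool × Bool × Bool)) (x : String) :
    (l.foldl (fun d item =>
      d.insert item ((d.getD item (false, false, false)).1, true, (d.getD item (false, false, false)).2.2)) d).getD x (false, false, false)
      = if x ∈ l then ((d.getD x (false, false, false)).1, true, (d.getD x (false, false, false)).2.2)
        else d.getD x (false, false, false) := by
  induction l generalizing d with
  | nil => simp
  | cons y l ih =>
    by_cases hxy : x = y
    · subst hxy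
      by_cases hxl : x ∈ l <;>
        simp [List.foldl_cons, ih, hxl, PySem.Dict.getD_insert_self]
    · by_cases hxl : x ∈ l <;>
        simp [List.foldl_cons, ih, hxl, hxy, PySem.Dict.getD_insert_of_ne _ _ _ hxy]

-- getD after the pass that sets the third flag.
theorem getD_passC (l : List String) (d : PySem.Dict String (Bool × Bool × Bool)) (x : String) :
    (l.foldl (fun d item =>
      d.insert item ((d.getD item (false, false, false)).1, (d.getD item (false, false, false)).2.1, true)) d).getD x (false, false, false)
      = if x ∈ l then ((d.getD x (false, false, false)).1, (d.getD x (false, false, false)).2.1, true)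
        else d.getD x (false, false, false) := by
  induction l generalizing d with
  | nil => simp
  | cons y l ih =>
    by_cases hxy : x = y
    · subst hxy
      by_cases hxl : x ∈ l <;>
        simp [List.foldl_cons, ih, hxl, PySem.Dict.getD_insert_self]
    · by_cases hxl : x ∈ l <;>
        simp [List.foldl_cons, ih, hxl, hxy, PySem.Dict.getD_insert_of_ne _ _ _ hxy]

-- the finished flag dict reads back exactly the three memberships.
theorem getD_flags (a b c : List String) (x : String) :
    (c.foldl (fun d item =>
        d.insert item ((d.getD item (false, false, false)).1, (d.getD item (false, false, false)).2.1, true))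
      (b.foldl (fun d item =>
        d.insert item ((d.getD item (false, false, false)).1, true, (d.getD item (false, false, false)).2.2))
      (a.foldl (fun d item =>
        d.insert item (true, (d.getD item (false, false, false)).2.1, (d.getD item (false, false, false)).2.2))
      PySem.Dict.empty))).getD x (false, false, false)
      = (decide (x ∈ a), decide (x ∈ b), decide (x ∈ c)) := by
  rw [getD_passC, getD_passB, getD_passA]
  by_cases ha : x ∈ a <;> by_cases hb : x ∈ b <;> by_cases hc : x ∈ c <;>
    simp [ha, hb, hc, PySem.Dict.getD]

-- the keys of the flag dict are the distinct items of a ++ b ++ c in first-occurrence order.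
theorem keys_flags (a b c : List String) :
    (c.foldl (fun d item =>
        d.insert item ((d.getD item (false, false, false)).1, (d.getD item (false, false, false)).2.1, true))
      (b.foldl (fun d item =>
        d.insert item ((d.getD item (false, false, false)).1, true, (d.getD item (false, false, false)).2.2))
      (a.foldl (fun d item =>
        d.insert item (true, (d.getD item (false, false, false)).2.1, (d.getD item (false, false, false)).2.2))
      PySem.Dict.empty))).keys
      = PySem.Set.ofList (a ++ (b ++ c)) := by
  rw [PySem.Dict.keys_foldl_insert, PySem.Dict.keys_foldl_insert, PySem.Dict.keys_foldl_insert]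
  rw [show (PySem.Dict.empty : PySem.Dict String (Bool × Bool × Bool)).keys = [] from rfl,
    PySem.Set.update_nil_left, ← PySem.Set.ofList_append, ← PySem.Set.ofList_append, List.append_assoc]

-- those keys carry no duplicate.
theorem nodup_keys_flags (a b c : List String) :
    (c.foldl (fun d item =>
        d.insert item ((d.getD item (false, false, false)).1, (d.getD item (false, false, false)).2.1, true))
      (b.foldl (fun d item =>
        d.insert item ((d.getD item (false, false, false)).1, true, (d.getD item (false, false, false)).2.2))
      (a.foldl (fun d item =>
        d.insert item (true, (d.getD item (false, false, false)).2.1, (d.getD item (false, false, false)).2.2))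
      PySem.Dict.empty))).keys.Nodup := by
  exact PySem.Dict.nodup_keys_foldl_insert _ _ _
    (PySem.Dict.nodup_keys_foldl_insert _ _ _
      (PySem.Dict.nodup_keys_foldl_insert _ _ _ List.nodup_nil))

-- a guarded set-building loop over a duplicate-free list is that list's filter.
theorem set_of_pred (keys : List String) (hnd : keys.Nodup) (q : String → Bool) :
    keys.foldl (fun s k => if q k then PySem.Set.add s k else s) ([] : PySem.Set String)
      = keys.filter q := by
  rw [PySem.List.foldl_if_eq_foldl_filter, foldl_add_eq_update, PySem.Set.update_nil_left,
    PySem.Set.ofList_eq_self_of_nodup _ (hnd.filter _)]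

-- filtering set(a ++ ys) by a predicate that forces membership in a is filtering set(a).
theorem filter_ofList_append_of_subset (a ys : List String) (q : String → Bool)
    (h : ∀ x, q x = true → x ∈ a) :
    (PySem.Set.ofList (a ++ ys)).filter q = (PySem.Set.ofList a).filter q := by
  rw [PySem.Set.ofList_append, PySem.Set.update_eq_append_filter, List.filter_append]
  have hnil : List.filter q (List.filter (fun y => !(PySem.Set.ofList a).contains y) (PySem.Set.ofList ys)) = [] := by
    rw [List.filter_eq_nil_iff]
    intro x hx hq
    have hna : x ∉ a := by
      have := List.of_mem_filter hx
      simp only [PySem.Set.contains_eq_listContains, List.contains_eq_mem, Bool.not_eq_eq_eq_not,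
        Bool.not_true, decide_eq_false_iff_not] at this
      simpa [PySem.Set.mem_ofList] using this
    exact hna (h x hq)
  rw [hnil, List.append_nil]

-- the finished flag dict's items, in insertion order, with membership flags read back.
theorem items_flags (a b c : List String) :
    (c.foldl (fun d item =>
        d.insert item ((d.getD item (false, false, false)).1, (d.getD item (false, false, false)).2.1, true))
      (b.foldl (fun d item =>
        d.insert item ((d.getD item (false, false, false)).1, true, (d.getD item (false, false, false)).2.2))
      (a.foldl (fun d item =>
        d.insert item (true, (d.getD item (false, false, false)).2.1, (d.getD item (false, false, false)).2.2))
      PySem.Dict.empty))).items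
      = (PySem.Set.ofList (a ++ (b ++ c))).map
          (fun k => (k, (decide (k ∈ a), decide (k ∈ b), decide (k ∈ c)))) := by
  rw [PySem.Dict.items_eq_map_keys _ (nodup_keys_flags a b c) (false, false, false), keys_flags]
  exact List.map_congr_left fun x _ => by rw [getD_flags]

-- the classification loop over the items splits into three independent folds.
theorem classify_fold (l : List (String × (Bool × Bool × Bool))) (u r q : PySem.Set String) :
    l.foldl (fun acc p =>
      (if p.2.1 && p.2.2.1 && p.2.2.2 then PySem.Set.add acc.1 p.1 else acc.1,
       if (p.2.1 && (p.2.2.1 || p.2.2.2)) || (p.2.2.1 && p.2.2.2) then PySem.Set.add acc.2.1 p.1 else acc.2.1,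
       if p.2.1 && !p.2.2.1 && !p.2.2.2 then PySem.Set.add acc.2.2 p.1 else acc.2.2)) (u, r, q)
    = (l.foldl (fun s p => if p.2.1 && p.2.2.1 && p.2.2.2 then PySem.Set.add s p.1 else s) u,
       l.foldl (fun s p => if (p.2.1 && (p.2.2.1 || p.2.2.2)) || (p.2.2.1 && p.2.2.2) then PySem.Set.add s p.1 else s) r,
       l.foldl (fun s p => if p.2.1 && !p.2.2.1 && !p.2.2.2 then PySem.Set.add s p.1 else s) q) := by
  induction l generalizing u r q with
  | nil => rfl
  | cons p l ih =>
    simp only [List.foldl_cons]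
    exact ih _ _ _

-- one classification component over the flagged items is a filter of the key list.
theorem comp_map_fold (a b c : List String) (P : Bool × Bool × Bool → Bool) :
    List.foldl (fun s p => if P p.2 then PySem.Set.add s p.1 else s) PySem.Set.empty
      ((PySem.Set.ofList (a ++ (b ++ c))).map
        (fun k => (k, (decide (k ∈ a), decide (k ∈ b), decide (k ∈ c)))))
    = (PySem.Set.ofList (a ++ (b ++ c))).filter
        (fun k => P (decide (k ∈ a), decide (k ∈ b), decide (k ∈ c))) := by
  rw [List.foldl_map]
  exact set_of_pred _ (PySem.Set.nodup_ofList _) _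

-- the universal component: both sides are the common elements in list_a's first-occurrence order.
theorem univ_eq (a b c : List String) :
    PySem.Set.ofList (a.filter (fun x => b.contains x && c.contains x))
      = (PySem.Set.ofList (a ++ (b ++ c))).filter
          (fun k => decide (k ∈ a) && decide (k ∈ b) && decide (k ∈ c)) := by
  rw [filter_ofList_append_of_subset _ _ _
    (fun x hx => by simp only [Bool.and_eq_true, decide_eq_true_eq] at hx; exact hx.1.1)]
  rw [ofList_filter]
  refine List.filter_congr fun x hx => ?_
  have hxa : x ∈ a := (PySem.Set.mem_ofList a x).1 hx
  simp [List.contains_eq_mem, hxa]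

-- the unique_a component.
theorem uniq_eq (a b c : List String) :
    PySem.Set.ofList (a.filter (fun x => !b.contains x && !c.contains x))
      = (PySem.Set.ofList (a ++ (b ++ c))).filter
          (fun k => decide (k ∈ a) && !decide (k ∈ b) && !decide (k ∈ c)) := by
  rw [filter_ofList_append_of_subset _ _ _
    (fun x hx => by simp only [Bool.and_eq_true, decide_eq_true_eq] at hx; exact hx.1.1)]
  rw [ofList_filter]
  refine List.filter_congr fun x hx => ?_
  have hxa : x ∈ a := (PySem.Set.mem_ofList a x).1 hx
  simp [List.contains_eq_mem, hxa]

-- the redundant component: first-occurrence order in list_a, then the new ones from list_b.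
theorem red_eq (a b c : List String) :
    PySem.Set.update (PySem.Set.ofList (a.filter (fun x => b.contains x || c.contains x)))
        (b.filter (fun x => c.contains x))
      = (PySem.Set.ofList (a ++ (b ++ c))).filter
          (fun k => (decide (k ∈ a) && (decide (k ∈ b) || decide (k ∈ c))) || (decide (k ∈ b) && decide (k ∈ c))) := by
  rw [PySem.Set.update_eq_append_filter]
  rw [show a ++ (b ++ c) = (a ++ b) ++ c from (List.append_assoc a b c).symm]
  rw [PySem.Set.ofList_append (a ++ b) c,
    PySem.Set.update_eq_append_filter (PySem.Set.ofList (a ++ b)) c, List.filter_append]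
  have hFc : List.filter
      (fun k => (decide (k ∈ a) && (decide (k ∈ b) || decide (k ∈ c))) || (decide (k ∈ b) && decide (k ∈ c)))
      (List.filter (fun y => !(PySem.Set.ofList (a ++ b)).contains y) (PySem.Set.ofList c)) = [] := by
    rw [List.filter_eq_nil_iff]
    intro x hx
    have hmem := List.of_mem_filter hx
    simp only [PySem.Set.contains_eq_listContains, List.contains_eq_mem, Bool.not_eq_eq_eq_not,
      Bool.not_true, decide_eq_false_iff_not, PySem.Set.mem_ofList, List.mem_append] at hmem
    rw [not_or] at hmem
    simp [hmem.1, hmem.2]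
  rw [hFc, List.append_nil]
  rw [PySem.Set.ofList_append a b, PySem.Set.update_eq_append_filter (PySem.Set.ofList a) b,
    List.filter_append]
  congr 1
  · rw [ofList_filter]
    refine List.filter_congr fun x hx => ?_
    have hxa : x ∈ a := (PySem.Set.mem_ofList a x).1 hx
    by_cases hb : x ∈ b <;> by_cases hc : x ∈ c <;> simp [List.contains_eq_mem, hxa, hb, hc]
  · rw [ofList_filter, ofList_filter, List.filter_filter, List.filter_filter]
    refine List.filter_congr fun x hx => ?_
    have hxb : x ∈ b := (PySem.Set.mem_ofList b x).1 hx
    by_cases ha : x ∈ a <;> by_cases hc : x ∈ c <;>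
      simp [PySem.Set.contains_eq_listContains, List.contains_eq_mem, PySem.Set.mem_ofList,
        List.mem_filter, hxb, ha, hc]

-- ===== VERDICT (by name: the statement is the Claim_ definition above) =====
theorem audit_blocklists_spec : Claim_equal_audit_blocklists := by
  intro a b c _
  show _ = _
  unfold audit_blocklists audit_blocklists_alt
  simp only [PySem.List.foldl_if_eq_foldl_filter, foldl_add_eq_update, PySem.Set.update_empty]
  rw [items_flags a b c, classify_fold]
  rw [comp_map_fold a b c (P := fun m => m.1 && m.2.1 && m.2.2),
    comp_map_fold a b c (P := fun m => (m.1 && (m.2.1 || m.2.2)) || (m.2.1 && m.2.2)),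
    comp_map_fold a b c (P := fun m => m.1 && !m.2.1 && !m.2.2)]
  exact Prod.ext (univ_eq a b c) (Prod.ext (red_eq a b c) (uniq_eq a b c))
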